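-- pv_equiv track=rewrite | github.com/Chandraa-Mahadik/DSA | basics/rotate_string_by_k.py | rotate_string_by_k
-- ===== SOURCE A (Python) =====
-- def rotate_string_by_k(s, k):
--     """
--     Rotates string 's' to the right by k using only reversal operations.
--     (Approach: reverse whole string, reverse first k, reverse last n-k)
--     Time:  O(n)
--     Space: O(n)  # strings are immutable, so we use a list
--     """
--
--     n = len(s)
--     k = k % n
--     arr = list(s)
--
--     # Helper reverse function
--     def reverse(l, r):
--         while l < r:
--             arr[l], arr[r] = arr[r], arr[l]
--             l += 1
--             r -= 1
--
--     # 1. Reverse entire string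
--     reverse(0, n - 1)
--
--     # 2. Reverse first k characters
--     reverse(0, k - 1)
--
--     # 3. Reverse last n-k characters
--     reverse(k, n - 1)
--
--     return "".join(arr)
-- ===== SOURCE B (Python) =====
-- def rotate_string_by_k(s, k):
--     k = k % len(s)
--     return s[-k:] + s[:-k]
-- ===== Notes on version B (the rewrite author's own statement) =====
-- stated objective: simpler
-- what changed: Replaces the three in-place segment reversals over a character list by the closed-form slice concatenation s[-k:] + s[:-k] after normalizing k modulo len(s).
import Mathlib
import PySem

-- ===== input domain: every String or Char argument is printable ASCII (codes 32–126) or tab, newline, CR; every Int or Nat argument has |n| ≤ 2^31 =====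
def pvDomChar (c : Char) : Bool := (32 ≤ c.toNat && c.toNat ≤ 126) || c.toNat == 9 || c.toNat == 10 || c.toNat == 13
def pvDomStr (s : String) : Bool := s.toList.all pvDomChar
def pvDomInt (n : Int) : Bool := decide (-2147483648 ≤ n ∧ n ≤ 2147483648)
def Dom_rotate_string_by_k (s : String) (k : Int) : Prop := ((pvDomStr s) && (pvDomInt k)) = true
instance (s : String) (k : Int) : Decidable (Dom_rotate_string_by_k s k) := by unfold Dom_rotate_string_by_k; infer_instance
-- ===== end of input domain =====

-- B replaces A's three in-place segment reversals by the closed-form slice concatenation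
-- s[-k:] + s[:-k] after k = k % len(s); objective: simpler.

-- ===== PORT A =====
-- the inner 'reverse(l, r)' while-loop: swap arr[l], arr[r]; l += 1; r -= 1
def pvRevLoop (arr : List Char) (l r : Int) : List Char :=
  if _h : l < r then
    let a := PySem.List.pyGetD arr l ' '
    let b := PySem.List.pyGetD arr r ' '
    pvRevLoop ((arr.set l.toNat b).set r.toNat a) (l + 1) (r - 1)
  else arr
termination_by (r - l).toNat
decreasing_by omega

def rotate_string_by_k (s : String) (k : Int) : String :=
  let n : Int := PySem.Str.len s
  let k := PySem.Int.mod k n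
  let arr := s.toList
  let arr := pvRevLoop arr 0 (n - 1)      -- 1. reverse entire string
  let arr := pvRevLoop arr 0 (k - 1)      -- 2. reverse first k characters
  let arr := pvRevLoop arr k (n - 1)      -- 3. reverse last n-k characters
  String.ofList arr                           -- "".join(arr)

-- ===== PORT B =====
def rotate_string_by_k_alt (s : String) (k : Int) : String :=
  let cs := s.toList
  let k := PySem.Int.mod k (PySem.Str.len s)
  String.ofList (PySem.List.slice cs (some (-k)) none ++ PySem.List.slice cs none (some (-k)))

-- ===== PRECONDITION & SPEC =====
-- Pre_ excludes only the empty string, on which both Pythons raise ZeroDivisionError at 'k % len(s)'.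
def Pre_rotate_string_by_k (s : String) (k : Int) : Prop := s.toList ≠ []
instance (s : String) (k : Int) : Decidable (Pre_rotate_string_by_k s k) := by unfold Pre_rotate_string_by_k; infer_instance
def pvWitness_rotate_string_by_k : String × Int := ("ab", 1)

def Spec_rotate_string_by_k (s : String) (k : Int) (out : String) : Prop := out = rotate_string_by_k_alt s k
instance (s : String) (k : Int) (out : String) : Decidable (Spec_rotate_string_by_k s k out) := by unfold Spec_rotate_string_by_k; infer_instance

-- ===== CLAIM (what is proved, stated in full; the proofs are below) =====
def Claim_equal_rotate_string_by_k : Prop := ∀ (s : String) (k : Int), Dom_rotate_string_by_k s k → Pre_rotate_string_by_k s k → Spec_rotate_string_by_k s k (rotate_string_by_k s k)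

-- ===== LEMMAS AND PROOFS =====

theorem pvRevLoop_length (arr : List Char) (l r : Int) :
    (pvRevLoop arr l r).length = arr.length := by
  induction arr, l, r using pvRevLoop.induct with
  | case1 arr l r h a b ih =>
      rw [pvRevLoop]; simp only [dif_pos h]; exact ih.trans (by simp)
  | case2 arr l r h => rw [pvRevLoop]; simp only [dif_neg h]

-- pointwise characterisation: pvRevLoop reverses the segment [l, r]
theorem pvRevLoop_getElem? (arr : List Char) (l r : Int) (h0 : 0 ≤ l)
    (hr : r < (arr.length : Int)) (i : Nat) :
    (pvRevLoop arr l r)[i]? =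
      if l ≤ (i : Int) ∧ (i : Int) ≤ r then arr[(l + r - i).toNat]? else arr[i]? := by
  induction arr, l, r using pvRevLoop.induct with
  | case2 arr l r h =>
      rw [pvRevLoop]; simp only [dif_neg h]
      split
      · next hc =>
          have hi : (l + r - (i : Int)).toNat = i := by omega
          rw [hi]
      · rfl
  | case1 arr l r h a b ih =>
      rw [pvRevLoop]
      simp only [dif_pos h]
      have hl : l.toNat < arr.length := by omega
      have hrn : r.toNat < arr.length := by omega
      have hlr : l.toNat ≠ r.toNat := by omega
      have ha : a = arr[l.toNat] := by
        show PySem.List.pyGetD arr l ' ' = _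
        exact PySem.List.pyGetD_eq_getElem arr ' ' (by omega) (by omega)
      have hb : b = arr[r.toNat] := by
        show PySem.List.pyGetD arr r ' ' = _
        exact PySem.List.pyGetD_eq_getElem arr ' ' (by omega) (by omega)
      have hlen : ((arr.set l.toNat b).set r.toNat a).length = arr.length := by simp
      rw [ih (by omega) (by omega)]
      have hget : ∀ j : Nat, ((arr.set l.toNat b).set r.toNat a)[j]? =
          if j = r.toNat then arr[l.toNat]? else if j = l.toNat then arr[r.toNat]? else arr[j]? := by
        intro j
        by_cases hj1 : j = r.toNat
        · subst hj1
          rw [List.getElem?_set_self (by simp [hrn])]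
          simp [ha, hl]
        · rw [List.getElem?_set_ne (by omega)]
          by_cases hj2 : j = l.toNat
          · subst hj2
            rw [List.getElem?_set_self (by simp [hl])]
            simp [hb, hrn, hj1]
          · rw [List.getElem?_set_ne (by omega)]
            simp [hj1, hj2]
      split
      · next hc =>
          rw [hget]
          have : ((l+1) + (r-1) - i).toNat ≠ r.toNat := by omega
          have : ((l+1) + (r-1) - i).toNat ≠ l.toNat := by omega
          rw [if_neg ‹((l+1) + (r-1) - i).toNat ≠ r.toNat›,
              if_neg ‹((l+1) + (r-1) - i).toNat ≠ l.toNat›]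
          rw [if_pos (by omega)]
          congr 1; omega
      · next hc =>
          rw [hget]
          by_cases hi : l ≤ (i : Int) ∧ (i : Int) ≤ r
          · -- i = l or i = r
            rw [if_pos hi]
            rcases (by omega : i = l.toNat ∨ i = r.toNat) with hi' | hi'
            · subst hi'
              rw [if_neg (by omega), if_pos rfl]
              congr 1; omega
            · subst hi'
              rw [if_pos rfl]
              congr 1; omega
          · rw [if_neg hi, if_neg (by omega), if_neg (by omega)]

-- ===== VERDICT (by name: the statement is the Claim_ definition above) =====

theorem rotate_string_by_k_spec : Claim_equal_rotate_string_by_k := by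
  intro s k _ hpre
  unfold Spec_rotate_string_by_k rotate_string_by_k rotate_string_by_k_alt
  simp only []
  set cs := s.toList with hcs
  have hn : 0 < cs.length := List.length_pos_iff.mpr hpre
  have hlen : PySem.Str.len s = (cs.length : Int) := by
    simp [PySem.Str.len_eq, hcs]
  rw [hlen]
  set n : Int := (cs.length : Int) with hnI
  set k' : Int := PySem.Int.mod k n with hk'
  have hk0 : 0 ≤ k' := PySem.Int.mod_nonneg k (by omega)
  have hkn : k' < n := PySem.Int.mod_lt k (by omega)
  apply congrArg String.ofList
  have hL1 := pvRevLoop_length cs 0 (n - 1)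
  have hL2 := pvRevLoop_length (pvRevLoop cs 0 (n - 1)) 0 (k' - 1)
  have hL3 := pvRevLoop_length (pvRevLoop (pvRevLoop cs 0 (n - 1)) 0 (k' - 1)) k' (n - 1)
  have hAget : ∀ i : Nat, (i : Int) < n →
      (pvRevLoop (pvRevLoop (pvRevLoop cs 0 (n - 1)) 0 (k' - 1)) k' (n - 1))[i]? =
      (if (i : Int) < k' then cs[(n - k' + i).toNat]? else cs[((i : Int) - k').toNat]?) := by
    intro i hi
    rw [pvRevLoop_getElem? _ k' (n - 1) hk0 (by omega)]
    by_cases hik : (i : Int) < k'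
    · rw [if_neg (by omega), if_pos hik]
      rw [pvRevLoop_getElem? _ 0 (k' - 1) le_rfl (by omega)]
      rw [if_pos (by constructor <;> omega)]
      rw [pvRevLoop_getElem? _ 0 (n - 1) le_rfl (by omega)]
      rw [if_pos (by constructor <;> omega)]
      congr 1; omega
    · rw [if_pos (by constructor <;> omega), if_neg hik]
      rw [pvRevLoop_getElem? _ 0 (k' - 1) le_rfl (by omega)]
      rw [if_neg (by omega)]
      rw [pvRevLoop_getElem? _ 0 (n - 1) le_rfl (by omega)]
      rw [if_pos (by constructor <;> omega)]
      congr 1; omega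
  by_cases h0 : k' = 0
  · -- k % n == 0 : both sides are cs itself
    have hB : PySem.List.slice cs (some (-k')) none ++ PySem.List.slice cs none (some (-k')) = cs := by
      simp [h0, PySem.List.slice_none_none, PySem.List.slice_to]
    rw [hB]
    apply List.ext_getElem?
    intro i
    by_cases hi : (i : Int) < n
    · rw [hAget i hi, if_neg (by omega)]
      congr 1; omega
    · rw [List.getElem?_eq_none (by omega), List.getElem?_eq_none (by omega)]
  · have hkpos : 0 < k'.toNat := by omega
    have h1 := PySem.List.slice_from_neg_natCast cs k'.toNat hkpos
    have h2 := PySem.List.slice_to_neg_natCast cs k'.toNat hkpos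
    rw [show (-k' : Int) = -(k'.toNat : Int) by omega, h1, h2]
    have hm : cs.length - k'.toNat = (n - k').toNat := by omega
    rw [hm]
    apply List.ext_getElem?
    intro i
    by_cases hi : (i : Int) < n
    · have hdl : (List.drop (n - k').toNat cs).length = k'.toNat := by
        rw [List.length_drop]; omega
      by_cases hik : (i : Int) < k'
      · rw [hAget i hi, if_pos hik, List.getElem?_append, if_pos (by rw [hdl]; omega),
            List.getElem?_drop]
        congr 1; omega
      · rw [hAget i hi, if_neg hik, List.getElem?_append, if_neg (by rw [hdl]; omega), hdl,
            List.getElem?_take_of_lt (by omega)]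
        congr 1; omega
    · rw [List.getElem?_eq_none (by omega), List.getElem?_eq_none (by simp only [List.length_append, List.length_drop, List.length_take]; omega)]
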